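-- pv_equiv track=rewrite | github.com/rothlabs/delimit_app | web/core/api/query_repo.py | filter_nodes_and_get_code_node_ids
-- ===== SOURCE A (Python) =====
-- def filter_nodes_and_get_code_node_ids(nodes, top_node_ids):
--     filtered_nodes = {}
--     code_node_ids = []
--     def select_node(id):
--         if id in filtered_nodes: return
--         if not id in nodes: return
--         filtered_nodes[id] = nodes[id]
--         code_terms = ['source', 'language']
--         for term, stems in nodes[id].items():
--             if term in code_terms: code_terms.remove(term)
--             for stem in stems:
--                 if isinstance(stem, str): select_node(stem)
--         if len(code_terms) == 0: code_node_ids.append(id)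
--     for id in top_node_ids: select_node(id)
--     return filtered_nodes, code_node_ids
-- ===== SOURCE B (Python) =====
-- def filter_nodes_and_get_code_node_ids(nodes, top_node_ids):
--     filtered_nodes = {}
--     code_node_ids = []
--     stack = [('enter', id) for id in reversed(top_node_ids)]
--     while stack:
--         kind, id = stack.pop()
--         if kind == 'enter':
--             if id in filtered_nodes or id not in nodes:
--                 continue
--             filtered_nodes[id] = nodes[id]
--             stack.append(('finalize', id))
--             children = [stem for stems in nodes[id].values()
--                         for stem in stems if isinstance(stem, str)]
--             for stem in reversed(children):
--                 stack.append(('enter', stem))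
--         else:
--             terms = nodes[id]
--             if 'source' in terms and 'language' in terms:
--                 code_node_ids.append(id)
--     return filtered_nodes, code_node_ids
-- ===== Notes on version B (the rewrite author's own statement) =====
-- stated objective: alternative
-- what changed: Replaces the inner recursive select_node helper by an iterative DFS over an explicit stack of enter/finalize entries (post-order code-id emission happens when the finalize marker is popped, and the code check becomes a direct two-membership test instead of removing from a code_terms list), so B never hits Python's recursion limit on deep graphs.
import Mathlib
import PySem

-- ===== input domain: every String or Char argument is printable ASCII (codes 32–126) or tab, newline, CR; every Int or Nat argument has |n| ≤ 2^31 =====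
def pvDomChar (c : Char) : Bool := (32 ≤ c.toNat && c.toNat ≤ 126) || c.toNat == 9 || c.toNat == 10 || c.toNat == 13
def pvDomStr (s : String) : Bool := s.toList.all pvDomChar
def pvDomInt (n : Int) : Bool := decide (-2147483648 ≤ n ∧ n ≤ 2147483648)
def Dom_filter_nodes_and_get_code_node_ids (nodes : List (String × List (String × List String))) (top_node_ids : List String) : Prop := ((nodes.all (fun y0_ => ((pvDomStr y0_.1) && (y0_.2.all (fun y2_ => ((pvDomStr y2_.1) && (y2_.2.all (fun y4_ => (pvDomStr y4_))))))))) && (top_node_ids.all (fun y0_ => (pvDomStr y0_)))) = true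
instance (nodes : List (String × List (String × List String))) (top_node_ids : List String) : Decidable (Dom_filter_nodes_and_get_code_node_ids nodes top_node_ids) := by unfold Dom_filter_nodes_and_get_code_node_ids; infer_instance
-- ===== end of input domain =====

-- ===== PORT A =====
-- Ports of A (recursive DFS, as in the Python) and B (explicit stack machine).
-- Equivalence of RETURN VALUES is proved for all inputs (A mutates only its own locals).

-- Python A's inner recursive `select_node`, transliterated step for step; the
-- recursion is made total by a fuel argument (a totality guard only): each
-- recursing call first adds an unvisited key of `nodes` to `filtered_nodes`,
-- so the recursion depth never exceeds `nodes.length + 1`, the fuel supplied below.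
def selNodeA (nodes : List (String × List (String × List String))) :
    Nat → (List (String × List (String × List String))) × List String → String →
    (List (String × List (String × List String))) × List String
  | 0, s, _ => s
  | f + 1, s, id =>
    if s.1.any (fun p => p.1 == id) then s       -- if id in filtered_nodes: return
    else
      match nodes.find? (fun p => p.1 == id) with -- if not id in nodes: return
      | none => s
      | some nd =>
        let s1 := (s.1 ++ [(id, nd.2)], s.2)      -- filtered_nodes[id] = nodes[id]
        -- for term, stems in nodes[id].items(): …  (code_terms shrinks, stems recurse;
        -- `isinstance(stem, str)` is identically true here: stems : List String)
        let r := nd.2.foldl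
          (fun p ti =>
            (ti.2.foldl (fun t st => selNodeA nodes f t st) p.1,
             if p.2.contains ti.1 then p.2.erase ti.1 else p.2))
          (s1, ["source", "language"])
        if r.2.length = 0 then (r.1.1, r.1.2 ++ [id]) else r.1

def filter_nodes_and_get_code_node_ids (nodes : List (String × List (String × List String))) (top_node_ids : List String) : (List (String × List (String × List String))) × List String :=
  top_node_ids.foldl (fun s id => selNodeA nodes (nodes.length + 1) s id) ([], [])

-- ===== PORT B =====
-- B: iterative DFS over an explicit stack of enter/finalize entries
-- (Lean list head = top of Python's stack, i.e. the end Python pops from).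
inductive PvTask where
  | enter : String → PvTask
  | fin : String → PvTask
deriving DecidableEq, Repr

-- number of keys of `nodes` not yet in `filtered` (B's termination measure)
def pvUnvisited (nodes filtered : List (String × List (String × List String))) : Nat :=
  (nodes.map Prod.fst).countP (fun k => !filtered.any (fun p => p.1 == k))

-- generic strict countP bound, used only for B's termination
theorem pv_countP_lt {a : Type} (l : List a) (p q : a → Bool)
    (hmono : ∀ x, p x = true → q x = true) (x : a) (hx : x ∈ l)
    (hp : p x = false) (hq : q x = true) : l.countP p < l.countP q := by
  induction l with
  | nil => cases hx
  | cons y l ih =>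
    have hmono' : l.countP p ≤ l.countP q := List.countP_mono_left (fun z _ => hmono z)
    rcases List.mem_cons.mp hx with rfl | hx'
    · simp only [List.countP_cons, hp, hq]
      simp
      omega
    · have hlt := ih hx'
      by_cases hpy : p y = true
      · have hqy := hmono y hpy
        simp [hpy, hqy]
        omega
      · cases hqy : q y <;> simp [hpy, hqy] <;> omega

-- visiting an unvisited key of `nodes` strictly shrinks the measure (cited by decreasing_by)
theorem pvUnvisited_lt (nodes l : List (String × List (String × List String)))
    (id : String) (nd : String × List (String × List String))
    (hf : nodes.find? (fun p => p.1 == id) = some nd)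
    (hv : l.any (fun p => p.1 == id) = false) :
    pvUnvisited nodes (l ++ [(id, nd.2)]) < pvUnvisited nodes l := by
  have hnd : nd.1 = id := by
    have := List.find?_some hf
    simpa using this
  have hmem : id ∈ nodes.map Prod.fst := by
    have := List.mem_of_find?_eq_some hf
    exact List.mem_map.mpr ⟨nd, this, hnd⟩
  refine pv_countP_lt _ _ _ ?_ id hmem ?_ ?_
  · intro x hx
    simp only [Bool.not_eq_true'] at hx ⊢
    simp only [List.any_append, Bool.or_eq_false_iff] at hx
    exact hx.1
  · simp
  · simpa using hv

def runB (nodes : List (String × List (String × List String))) :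
    List PvTask → (List (String × List (String × List String))) × List String →
    (List (String × List (String × List String))) × List String
  | [], s => s
  | PvTask.enter id :: k, s =>
    if s.1.any (fun p => p.1 == id) then runB nodes k s
    else
      match h : nodes.find? (fun p => p.1 == id) with
      | none => runB nodes k s
      | some nd =>
        runB nodes ((nd.2.flatMap (fun ti => ti.2)).map PvTask.enter ++ PvTask.fin id :: k)
          (s.1 ++ [(id, nd.2)], s.2)
  | PvTask.fin id :: k, s =>
    let isCode :=
      match nodes.find? (fun p => p.1 == id) with
      | none => false
      | some nd => nd.2.any (fun ti => ti.1 == "source") && nd.2.any (fun ti => ti.1 == "language")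
    runB nodes k (s.1, if isCode then s.2 ++ [id] else s.2)
termination_by k s => (pvUnvisited nodes s.1, k.length)
decreasing_by
  · exact Prod.Lex.right _ (by simp)
  · exact Prod.Lex.right _ (by simp)
  · refine Prod.Lex.left _ _ (pvUnvisited_lt nodes s.1 id nd h ?_)
    rename_i hno
    cases hb : s.1.any (fun p => p.1 == id)
    · rfl
    · exact absurd hb hno
  · exact Prod.Lex.right _ (by simp)

def filter_nodes_and_get_code_node_ids_alt (nodes : List (String × List (String × List String))) (top_node_ids : List String) : (List (String × List (String × List String))) × List String :=
  runB nodes (top_node_ids.map PvTask.enter) ([], [])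

-- ===== PRECONDITION & SPEC =====
def Spec_filter_nodes_and_get_code_node_ids (nodes : List (String × List (String × List String))) (top_node_ids : List String) (out : (List (String × List (String × List String))) × List String) : Prop := out = filter_nodes_and_get_code_node_ids_alt nodes top_node_ids
instance (nodes : List (String × List (String × List String))) (top_node_ids : List String) (out : (List (String × List (String × List String))) × List String) : Decidable (Spec_filter_nodes_and_get_code_node_ids nodes top_node_ids out) := by unfold Spec_filter_nodes_and_get_code_node_ids; infer_instance

-- ===== CLAIM (what is proved, stated in full; the proofs are below) =====
def Claim_equal_filter_nodes_and_get_code_node_ids : Prop := ∀ (nodes : List (String × List (String × List String))) (top_node_ids : List String), Dom_filter_nodes_and_get_code_node_ids nodes top_node_ids → Spec_filter_nodes_and_get_code_node_ids nodes top_node_ids (filter_nodes_and_get_code_node_ids nodes top_node_ids)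

-- ===== LEMMAS AND PROOFS =====

-- abbreviation used only in statements below
def pvS := (List (String × List (String × List String))) × List String

-- the code_terms loop computes a filter of the initial code_terms list
theorem ctFold_char (terms : List (String × List String)) :
    ∀ (ct : List String), ct.Nodup →
      terms.foldl (fun ct ti => if ct.contains ti.1 then ct.erase ti.1 else ct) ct
        = ct.filter (fun c => !terms.any (fun ti => ti.1 == c)) := by
  induction terms with
  | nil => intro ct _; simp
  | cons t rest ih =>
    intro ct hnd
    have hstep : (if ct.contains t.1 then ct.erase t.1 else ct)
        = ct.filter (fun c => !(t.1 == c)) := by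
      by_cases hc : ct.contains t.1
      · rw [if_pos hc, List.Nodup.erase_eq_filter hnd]
        congr 1; funext c; simp [bne, BEq.comm]
      · rw [if_neg hc]
        symm
        apply List.filter_eq_self.mpr
        intro c hcmem
        simp only [Bool.not_eq_eq_eq_not, Bool.not_true]
        exact beq_eq_false_iff_ne.mpr
          (fun h => hc (List.contains_iff_mem.mpr (by rw [h]; exact hcmem)))
    rw [List.foldl_cons, hstep, ih _ (List.Nodup.filter _ hnd), List.filter_filter]
    congr 1; funext c
    simp [Bool.and_comm]

-- one step of A's recursion, reshaped: the (state, code_terms) pair-fold splits into a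
-- fold over the flattened string stems and a membership test on the term keys
theorem selNodeA_succ (nodes : List (String × List (String × List String))) (f : Nat)
    (s : pvS) (id : String) :
    selNodeA nodes (f + 1) s id =
      if s.1.any (fun p => p.1 == id) then s
      else
        match nodes.find? (fun p => p.1 == id) with
        | none => s
        | some nd =>
          let X := (nd.2.flatMap (fun ti => ti.2)).foldl
            (fun t st => selNodeA nodes f t st) (s.1 ++ [(id, nd.2)], s.2)
          if nd.2.any (fun ti => ti.1 == "source") && nd.2.any (fun ti => ti.1 == "language")
          then (X.1, X.2 ++ [id]) else X := by
  show (if s.1.any (fun p => p.1 == id) then s else _) = _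
  by_cases hv : s.1.any (fun p => p.1 == id)
  · simp [hv]
  · simp only [hv, if_false, Bool.false_eq_true]
    cases hf : nodes.find? (fun p => p.1 == id) with
    | none => rfl
    | some nd =>
      simp only []
      rw [PySem.List.foldl_prod_mk
            (fun t (ti : String × List String) => ti.2.foldl (fun u st => selNodeA nodes f u st) t)
            (fun ct ti => if ct.contains ti.1 then ct.erase ti.1 else ct)
            nd.2 (s.1 ++ [(id, nd.2)], s.2) ["source", "language"],
          List.foldl_flatMap,
          ctFold_char nd.2 ["source", "language"] (by decide)]
      cases hS : nd.2.any (fun ti => ti.1 == "source") <;>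
        cases hL : nd.2.any (fun ti => ti.1 == "language") <;>
          simp [List.filter, hS, hL]

-- keys present in the filtered dict stay present through A's recursion
theorem selNodeA_keeps (nodes : List (String × List (String × List String))) :
    ∀ (f : Nat) (s : pvS) (id key : String),
      s.1.any (fun p => p.1 == key) = true →
      (selNodeA nodes f s id).1.any (fun p => p.1 == key) = true := by
  intro f
  induction f with
  | zero => intro s id key h; exact h
  | succ f ih =>
    have hfold : ∀ (xs : List String) (t : pvS) (key : String),
        t.1.any (fun p => p.1 == key) = true →
        ((xs.foldl (fun u st => selNodeA nodes f u st) t).1.any (fun p => p.1 == key)) = true := by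
      intro xs
      induction xs with
      | nil => intro t key h; exact h
      | cons x xs ihx => intro t key h; exact ihx _ _ (ih t x key h)
    intro s id key h
    rw [selNodeA_succ]
    by_cases hv : s.1.any (fun p => p.1 == id)
    · simpa [hv] using h
    · simp only [hv, Bool.false_eq_true, if_false]
      cases hf : nodes.find? (fun p => p.1 == id) with
      | none => exact h
      | some nd =>
        simp only []
        have hbase : ((s.1 ++ [(id, nd.2)], s.2) : pvS).1.any (fun p => p.1 == key) = true := by
          simp [List.any_append, h]
        have := hfold (nd.2.flatMap (fun ti => ti.2)) (s.1 ++ [(id, nd.2)], s.2) key hbase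
        cases nd.2.any (fun ti => ti.1 == "source") && nd.2.any (fun ti => ti.1 == "language") <;>
          simpa using this

-- hence the unvisited measure never grows along A's recursion
theorem pvUnvisited_selNodeA_le (nodes : List (String × List (String × List String)))
    (f : Nat) (s : pvS) (id : String) :
    pvUnvisited nodes (selNodeA nodes f s id).1 ≤ pvUnvisited nodes s.1 := by
  apply List.countP_mono_left
  intro x _ hp
  cases hcase : s.1.any (fun p => p.1 == x) with
  | false => simp
  | true => rw [selNodeA_keeps nodes f s id x hcase] at hp; simp at hp

-- MAIN LEMMA: popping an enter entry runs A's select_node on the state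
theorem runB_enter (nodes : List (String × List (String × List String))) :
    ∀ (f : Nat) (s : pvS) (id : String) (k : List PvTask),
      pvUnvisited nodes s.1 < f →
      runB nodes (PvTask.enter id :: k) s = runB nodes k (selNodeA nodes f s id) := by
  intro f
  induction f using Nat.strong_induction_on with
  | _ f IH =>
    intro s id k hlt
    match f, hlt with
    | f + 1, hlt =>
    rw [selNodeA_succ, runB]
    by_cases hv : s.1.any (fun p => p.1 == id)
    · simp [hv]
    · simp only [hv, Bool.false_eq_true, if_false]
      cases hf : nodes.find? (fun p => p.1 == id) with
      | none => rfl
      | some nd =>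
        simp only []
        have hv' : s.1.any (fun p => p.1 == id) = false := by
          cases hb : s.1.any (fun p => p.1 == id)
          · rfl
          · exact absurd hb hv
        have hμ1 : pvUnvisited nodes (s.1 ++ [(id, nd.2)]) < f :=
          lt_of_lt_of_le (pvUnvisited_lt nodes s.1 id nd hf hv')
            (Nat.lt_succ_iff.mp hlt)
        have hstems : ∀ (xs : List String) (t : pvS) (k' : List PvTask),
            pvUnvisited nodes t.1 < f →
            runB nodes (xs.map PvTask.enter ++ k') t
              = runB nodes k' (xs.foldl (fun u st => selNodeA nodes f u st) t) := by
          intro xs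
          induction xs with
          | nil => intro t k' _; rfl
          | cons x xs ihx =>
            intro t k' ht
            rw [List.map_cons, List.cons_append, IH f (Nat.lt_succ_self f) t x _ ht]
            exact ihx _ k' (lt_of_le_of_lt (pvUnvisited_selNodeA_le nodes f t x) ht)
        rw [hstems _ _ _ hμ1]
        rw [runB]
        simp only [hf]
        cases nd.2.any (fun ti => ti.1 == "source") && nd.2.any (fun ti => ti.1 == "language") <;>
          simp

theorem pvUnvisited_le (nodes filtered : List (String × List (String × List String))) :
    pvUnvisited nodes filtered ≤ nodes.length := by
  calc pvUnvisited nodes filtered ≤ (nodes.map Prod.fst).length := List.countP_le_length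
    _ = nodes.length := by simp

theorem runB_top (nodes : List (String × List (String × List String))) :
    ∀ (tops : List String) (s : pvS),
      runB nodes (tops.map PvTask.enter) s
        = tops.foldl (fun t id => selNodeA nodes (nodes.length + 1) t id) s := by
  intro tops
  induction tops with
  | nil => intro s; simp [runB]
  | cons x xs ih =>
    intro s
    rw [List.map_cons,
        runB_enter nodes (nodes.length + 1) s x _ (Nat.lt_succ_of_le (pvUnvisited_le nodes s.1)),
        ih]
    rfl

-- ===== VERDICT (by name: the statement is the Claim_ definition above) =====
theorem filter_nodes_and_get_code_node_ids_spec : Claim_equal_filter_nodes_and_get_code_node_ids := by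
  intro nodes top_node_ids _
  show filter_nodes_and_get_code_node_ids nodes top_node_ids
      = filter_nodes_and_get_code_node_ids_alt nodes top_node_ids
  rw [filter_nodes_and_get_code_node_ids, filter_nodes_and_get_code_node_ids_alt, runB_top]
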